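-- pv_equiv track=rewrite | github.com/penn-cnt/NLP_Disparities_in_Seizure_Freedom | model_bias_functions.py | get_aggregate_hasSz
-- ===== SOURCE A (Python) =====
-- def get_aggregate_hasSz(pred_list):
--     """Performs plurality voting on a list of hasSz predictions.
--     Copied and adapted from get_aggregate_hasSz(self) in pipeline_utilities.py"""
--     if None in pred_list:
--         raise
--
--     #count the votes
--     votes = dict.fromkeys(set(pred_list), 0)
--     for vote in pred_list:
--         votes[vote] += 1
--
--     #get the value(s) with the highest number of votes
--     most_votes = -1
--     most_vals = []
--     for val in votes:
--         if votes[val] > most_votes: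
--             most_votes = votes[val]
--             most_vals = []
--         if votes[val] >= most_votes:
--             most_vals.append(val)
--
--     #if there is only 1 value with most votes, pick it
--     if len(most_vals) == 1:
--         return most_vals[0]
--     #otherwise, if 0,1 both have the highest number of visits, then return idk (2)
--     elif (0 in most_vals) and (1 in most_vals):
--         return 2
--     #otherwise, it must be that either 0 and 1 are tied with idk (2). Return either the 0 or 1
--     else:
--         most_vals.sort() #sort, since IDK is always 2
--         return most_vals[0]
-- ===== SOURCE B (Python) =====
-- from itertools import groupby
--
-- def get_aggregate_hasSz(pred_list):
--     """Plurality voting via sort-and-group instead of a dict frequency table."""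
--     if None in pred_list:
--         raise
--
--     # group the sorted votes into (value, count) pairs, values strictly increasing
--     counts = [(val, len(list(g))) for val, g in groupby(sorted(pred_list))]
--     most_votes = max(n for _, n in counts)
--     most_vals = [val for val, n in counts if n == most_votes]
--
--     if len(most_vals) == 1:
--         return most_vals[0]
--     elif (0 in most_vals) and (1 in most_vals):
--         return 2
--     else:
--         return most_vals[0]  # counts was built sorted ascending
-- ===== Notes on version B (the rewrite author's own statement) =====
-- stated objective: alternative
-- what changed: B replaces the dict frequency table and the running-max scan over dict keys by sorting the votes, grouping with itertools.groupby into (value,count) pairs, and filtering the groups at the maximal count (already in ascending order, so no final sort).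
import Mathlib
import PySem

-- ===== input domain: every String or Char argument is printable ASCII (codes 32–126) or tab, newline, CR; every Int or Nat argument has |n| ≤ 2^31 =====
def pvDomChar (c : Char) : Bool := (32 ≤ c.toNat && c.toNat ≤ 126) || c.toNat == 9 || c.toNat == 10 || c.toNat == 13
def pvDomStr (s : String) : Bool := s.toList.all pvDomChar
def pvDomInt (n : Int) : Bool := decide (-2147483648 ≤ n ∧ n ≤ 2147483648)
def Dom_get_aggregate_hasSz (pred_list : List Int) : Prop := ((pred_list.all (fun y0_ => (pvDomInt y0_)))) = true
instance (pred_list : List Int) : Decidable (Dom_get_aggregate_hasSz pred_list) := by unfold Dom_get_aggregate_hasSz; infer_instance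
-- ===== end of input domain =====

-- B does plurality voting by sort-and-group (groupby) instead of A's dict frequency
-- table with a running-max scan over the keys (objective: alternative; same result).

-- ===== PORT A =====
-- `None in pred_list` can never hold for a list of ints, so the bare `raise` is dead here.
-- dict.fromkeys(set(pred_list), 0): set/dict hash iteration order is not modelled; we use
-- first-occurrence order (the final result is proved independent of the key order).
def get_aggregate_hasSz (pred_list : List Int) : Int :=
  let votes0 : PySem.Dict Int Int :=
    (PySem.Set.ofList pred_list).foldl (fun d k => d.insert k 0) PySem.Dict.empty
  -- for vote in pred_list: votes[vote] += 1   (key always present, so no KeyError)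
  let votes := pred_list.foldl (fun d v => d.insert v (d.getD v 0 + 1)) votes0
  -- for val in votes: keep the running maximum and the values attaining it
  let sel := votes.keys.foldl (fun (st : Int × List Int) val =>
      let c := votes.getD val 0
      let st := if c > st.1 then (c, ([] : List Int)) else st
      if c ≥ st.1 then (st.1, st.2 ++ [val]) else st) (-1, [])
  let most_vals := sel.2
  if most_vals.length == 1 then most_vals.headD 0   -- most_vals[0]; nonempty in this branch
  else if (most_vals.contains 0) && (most_vals.contains 1) then 2
  else (PySem.List.sorted most_vals (fun x => x) false).headD 0
    -- most_vals.sort(); most_vals[0] — IndexError when pred_list = [] (excluded by Pre_)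

-- ===== PORT B =====
-- itertools.groupby over a sorted list, as (value, run length) pairs
def pvGroups : List Int → List (Int × Int)
  | [] => []
  | x :: xs =>
    match pvGroups xs with
    | [] => [(x, 1)]
    | (v, n) :: t => if x == v then (v, n + 1) :: t else (x, 1) :: (v, n) :: t

def get_aggregate_hasSz_alt (pred_list : List Int) : Int :=
  let counts := pvGroups (PySem.List.sorted pred_list (fun x => x) false)
  -- max(...) raises ValueError on an empty sequence, i.e. when pred_list = [] (excluded by Pre_)
  let most_votes := (PySem.List.max? (counts.map (·.2)) (fun n => n)).getD 0
  let most_vals := (counts.filter (fun p => p.2 == most_votes)).map (·.1)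
  if most_vals.length == 1 then most_vals.headD 0
  else if (most_vals.contains 0) && (most_vals.contains 1) then 2
  else most_vals.headD 0

-- ===== PRECONDITION & SPEC =====
-- On [] A raises IndexError (most_vals[0] of an empty list) and B raises ValueError (max of
-- an empty sequence); the empty list is excluded, A returns on every other list of ints.
def Pre_get_aggregate_hasSz (pred_list : List Int) : Prop := pred_list ≠ []
instance (pred_list : List Int) : Decidable (Pre_get_aggregate_hasSz pred_list) := by
  unfold Pre_get_aggregate_hasSz; infer_instance
def pvWitness_get_aggregate_hasSz : List Int := [0, 1, 1]

def Spec_get_aggregate_hasSz (pred_list : List Int) (out : Int) : Prop :=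
  out = get_aggregate_hasSz_alt pred_list
instance (pred_list : List Int) (out : Int) : Decidable (Spec_get_aggregate_hasSz pred_list out) := by
  unfold Spec_get_aggregate_hasSz; infer_instance

-- ===== CLAIM (what is proved, stated in full; the proofs are below) =====
def Claim_equal_get_aggregate_hasSz : Prop := ∀ (pred_list : List Int),
  Dom_get_aggregate_hasSz pred_list → Pre_get_aggregate_hasSz pred_list →
  Spec_get_aggregate_hasSz pred_list (get_aggregate_hasSz pred_list)

-- ===== LEMMAS AND PROOFS =====

-- A's zero-initialised dict maps everything to 0
lemma pv_votes0_getD (ks : List Int) (d : PySem.Dict Int Int) (h : ∀ v, d.getD v 0 = 0) (v : Int) :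
    ((ks.foldl (fun d k => d.insert k (0 : Int)) d).getD v 0) = 0 := by
  induction ks generalizing d with
  | nil => exact h v
  | cons k ks ih =>
    exact ih _ (fun w => by rw [PySem.Dict.getD_insert]; split <;> simp [h])

-- A's counting loop produces the multiplicities of pred_list
lemma pv_votes_getD (pred_list : List Int) (v : Int) :
    ((pred_list.foldl (fun d x => d.insert x (d.getD x 0 + 1))
        ((PySem.Set.ofList pred_list).foldl (fun d k => d.insert k (0 : Int)) PySem.Dict.empty)).getD v 0)
      = (pred_list.count v : Int) := by
  rw [PySem.Dict.getD_foldl_insert_add_one]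
  rw [pv_votes0_getD _ _ (fun w => by simp [PySem.Dict.getD_empty])]
  simp

-- and its keys are the distinct elements of pred_list in first-occurrence order
lemma pv_votes_keys (pred_list : List Int) :
    (pred_list.foldl (fun d x => d.insert x (d.getD x 0 + 1))
        ((PySem.Set.ofList pred_list).foldl (fun d k => d.insert k (0 : Int)) PySem.Dict.empty)).keys
      = PySem.Set.ofList pred_list := by
  rw [PySem.Dict.keys_foldl_insert, PySem.Dict.keys_foldl_insert, PySem.Dict.keys_empty,
      PySem.Set.update_nil_left, PySem.Set.ofList_ofList, PySem.Set.update_eq_append_filter]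
  simp [List.filter_eq_nil_iff, PySem.Set.mem_ofList]

-- one step of A's selection loop, written as a two-way comparison
lemma pv_step (c : Int → Int) (x m : Int) (vals : List Int) :
    ((fun (st : Int × List Int) val =>
        let cc := c val
        let st := if cc > st.1 then (cc, ([] : List Int)) else st
        if cc ≥ st.1 then (st.1, st.2 ++ [val]) else st) (m, vals) x)
      = if c x > m then (c x, [x]) else if c x = m then (m, vals ++ [x]) else (m, vals) := by
  simp only [gt_iff_lt, ge_iff_le]
  split_ifs with h1 h2 h3 h4 h5 <;> (simp_all; all_goals omega)

-- A's selection loop computes the filter at the running maximum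
lemma pv_sel (c : Int → Int) (K : List Int) (m : Int) (vals : List Int) :
    K.foldl (fun (st : Int × List Int) val =>
        let cc := c val
        let st := if cc > st.1 then (cc, ([] : List Int)) else st
        if cc ≥ st.1 then (st.1, st.2 ++ [val]) else st) (m, vals)
      = ((K.map c).foldl max m,
         (if (K.map c).foldl max m = m then vals else [])
           ++ K.filter (fun v => c v = (K.map c).foldl max m)) := by
  induction K generalizing m vals with
  | nil => simp
  | cons x K ih =>
    have hM : max m (c x) ≤ (K.map c).foldl max (max m (c x)) :=
      (PySem.List.le_foldl_max (K.map c) (max m (c x))).1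
    rw [List.foldl_cons, List.map_cons, List.foldl_cons, List.filter_cons]
    rw [show ((let cc := c x;
          let st := if cc > (m, vals).1 then (cc, ([] : List Int)) else (m, vals);
          if cc ≥ st.1 then (st.1, st.2 ++ [x]) else st) : Int × List Int)
        = if c x > m then (c x, [x]) else if c x = m then (m, vals ++ [x]) else (m, vals)
        from pv_step c x m vals]
    rcases lt_trichotomy (c x) m with h | h | h
    · have hmx : max m (c x) = m := by omega
      rw [if_neg (by omega), if_neg (by omega), ih, hmx]
      have : ¬ (c x = (K.map c).foldl max m) := by rw [hmx] at hM; omega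
      simp [this]
    · have hmx : max m (c x) = m := by omega
      rw [if_neg (by omega), if_pos h, ih, hmx]
      by_cases hEq : (K.map c).foldl max m = m
      · simp [hEq, h, List.append_assoc]
      · have : ¬ (c x = (K.map c).foldl max m) := by omega
        simp [hEq, this]
    · have hmx : max m (c x) = c x := by omega
      rw [if_pos (by omega), ih, hmx]
      rw [hmx] at hM
      have hne : ¬ ((K.map c).foldl max (c x) = m) := by omega
      rw [if_neg hne]
      by_cases hEq : (K.map c).foldl max (c x) = c x
      · simp [hEq]
      · have : ¬ (c x = (K.map c).foldl max (c x)) := by omega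
        simp [hEq, this]

-- the grouped values are exactly the values of the list
lemma pv_groups_mem (s : List Int) (v : Int) :
    v ∈ (pvGroups s).map Prod.fst ↔ v ∈ s := by
  induction s with
  | nil => simp [pvGroups]
  | cons x xs ih =>
    cases hg : pvGroups xs with
    | nil =>
      simp only [pvGroups, hg]
      rw [hg] at ih
      simp only [List.map_nil, List.mem_nil_iff] at ih
      simp [List.mem_cons, ← ih]
    | cons q t =>
      obtain ⟨w, n⟩ := q
      rw [hg] at ih
      simp only [pvGroups, hg]
      by_cases hxw : x = w
      · subst hxw
        simp only [BEq.rfl, if_true]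
        simp only [List.map_cons, List.mem_cons] at *
        constructor
        · rintro (rfl | h)
          · exact Or.inl rfl
          · exact Or.inr (ih.mp (Or.inr h))
        · rintro (rfl | h)
          · exact Or.inl rfl
          · exact ih.mpr h
      · simp only [beq_iff_eq, hxw, if_false]
        simp only [List.map_cons, List.mem_cons] at *
        constructor
        · rintro (rfl | h)
          · exact Or.inl rfl
          · exact Or.inr (ih.mp h)
        · rintro (rfl | h)
          · exact Or.inl rfl
          · exact Or.inr (ih.mpr h)

-- on a sorted list: grouped values strictly increase and carry the true multiplicities
lemma pv_groups (s : List Int) (hs : s.Pairwise (· ≤ ·)) :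
    ((pvGroups s).map Prod.fst).Pairwise (· < ·)
    ∧ (∀ p ∈ pvGroups s, p.2 = (s.count p.1 : Int) ∧ 1 ≤ p.2) := by
  induction s with
  | nil => simp [pvGroups]
  | cons x xs ih =>
    rw [List.pairwise_cons] at hs
    obtain ⟨hx, hxs⟩ := hs
    obtain ⟨ihp, ihc⟩ := ih hxs
    cases hg : pvGroups xs with
    | nil =>
      have hxsnil : xs = [] := by
        rw [List.eq_nil_iff_forall_not_mem]
        intro a ha
        have := (pv_groups_mem xs a).mpr ha
        simp [hg] at this
      subst hxsnil
      simp [pvGroups]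
    | cons q t =>
      obtain ⟨v, n⟩ := q
      rw [hg] at ihp ihc
      simp only [List.map_cons] at ihp
      obtain ⟨hvlt, hpt⟩ := List.pairwise_cons.mp ihp
      have hvmem : v ∈ xs := (pv_groups_mem xs v).mp (by simp [hg])
      have hxv : x ≤ v := hx v hvmem
      have hvn := ihc (v, n) (by simp)
      simp only at hvn
      simp only [pvGroups, hg]
      by_cases hxveq : x = v
      · subst hxveq
        simp only [BEq.rfl, if_true]
        refine ⟨by simp only [List.map_cons]; exact List.pairwise_cons.mpr ⟨hvlt, hpt⟩, ?_⟩
        intro p hp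
        rcases List.mem_cons.mp hp with rfl | hp
        · simp only [List.count_cons_self]
          constructor
          · push_cast
            omega
          · omega
        · have hc := ihc p (List.mem_cons_of_mem _ hp)
          have hpx : x < p.1 := hvlt p.1 (List.mem_map_of_mem hp)
          rw [List.count_cons_of_ne (by omega)]
          exact hc
      · have hxvlt : x < v := lt_of_le_of_ne hxv hxveq
        simp only [beq_iff_eq, hxveq, if_false]
        have hxnot : x ∉ xs := by
          intro hmem
          have hmm : x ∈ ((v, n) :: t).map Prod.fst := by
            rw [← hg]; exact (pv_groups_mem xs x).mpr hmem
          simp only [List.map_cons, List.mem_cons] at hmm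
          rcases hmm with h | h
          · omega
          · have := hvlt x h
            omega
        refine ⟨?_, ?_⟩
        · simp only [List.map_cons]
          rw [List.pairwise_cons]
          refine ⟨?_, ihp⟩
          intro w hw
          rcases List.mem_cons.mp hw with rfl | h
          · omega
          · have := hvlt w h
            omega
        · intro p hp
          rcases List.mem_cons.mp hp with rfl | hp
          · simp only [List.count_cons_self]
            rw [List.count_eq_zero.mpr hxnot]
            simp
          · have hc := ihc p hp
            have hpge : v ≤ p.1 := by
              rcases List.mem_cons.mp hp with rfl | hp'
              · exact le_refl _
              · have := hvlt p.1 (List.mem_map_of_mem hp')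
                omega
            rw [List.count_cons_of_ne (by omega)]
            exact hc

-- the assembled equivalence on nonempty lists
lemma pv_main (pl : List Int) (hne : pl ≠ []) :
    get_aggregate_hasSz pl = get_aggregate_hasSz_alt pl := by
  -- unfold both ports and normalise A's two loops
  simp only [get_aggregate_hasSz, get_aggregate_hasSz_alt]
  rw [pv_votes_keys]
  simp only [pv_votes_getD]
  rw [pv_sel (fun v => ((pl.count v : Int))) (PySem.Set.ofList pl) (-1) []]
  simp only [ite_self, List.nil_append,
    show (fun x : Int × Int => x.1) = Prod.fst from rfl]
  set s := PySem.List.sorted pl (fun x => x) false with hs_def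
  have hsperm : s.Perm pl := PySem.List.sorted_perm pl (fun x => x) false
  have hspw : s.Pairwise (· ≤ ·) := PySem.List.sorted_pairwise pl (fun x => x)
  obtain ⟨hpwB, hcnt⟩ := pv_groups s hspw
  -- the groups are nonempty
  have hsne : s ≠ [] := by
    intro h
    exact hne ((PySem.List.sorted_eq_nil_iff pl (fun x => x) false).mp (hs_def ▸ h))
  have hgne : pvGroups s ≠ [] := by
    intro h
    rcases List.exists_mem_of_ne_nil s hsne with ⟨a, ha⟩
    have := (pv_groups_mem s a).mpr ha
    rw [h] at this
    simp at this
  -- B's distinct values are a permutation of A's dict keys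
  set DB := (pvGroups s).map Prod.fst with hDB_def
  have hDBnodup : DB.Nodup := hpwB.imp ne_of_lt
  have hperm : DB.Perm (PySem.Set.ofList pl) := by
    rw [List.perm_ext_iff_of_nodup hDBnodup (PySem.Set.nodup_ofList pl)]
    intro a
    rw [hDB_def, pv_groups_mem, PySem.Set.mem_ofList]
    exact hsperm.mem_iff
  -- B's group counts are pl-counts
  have hsnd : ∀ p ∈ pvGroups s, p.2 = ((pl.count p.1 : Int)) := by
    intro p hp
    rw [(hcnt p hp).1]
    exact_mod_cast hsperm.count_eq p.1
  have hmapsnd : (pvGroups s).map (fun p => p.2) = DB.map (fun v => ((pl.count v : Int))) := by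
    rw [hDB_def, List.map_map]
    exact List.map_congr_left hsnd
  -- the two maxima agree
  obtain ⟨g, t, hgt⟩ := List.exists_cons_of_ne_nil hgne
  have hg1 : 1 ≤ g.2 := (hcnt g (by rw [hgt]; simp)).2
  have hMA : ((PySem.Set.ofList pl).map (fun v => ((pl.count v : Int)))).foldl max (-1)
      = ((pvGroups s).map (fun p => p.2)).foldl max (-1) := by
    rw [hmapsnd]
    exact List.Perm.foldl_op_eq ((hperm.map _).symm)
  have hMB : (PySem.List.max? ((pvGroups s).map (fun p => p.2)) (fun n => n)).getD 0
      = ((pvGroups s).map (fun p => p.2)).foldl max (-1) := by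
    rw [hgt]
    simp only [List.map_cons, PySem.List.max?_id_cons, Option.getD_some, List.foldl_cons]
    rw [show max (-1 : Int) g.2 = g.2 by omega]
  rw [hMB, hMA]
  set M := ((pvGroups s).map (fun p => p.2)).foldl max (-1) with hM_def
  -- the two most_vals lists: B's is the sorted form of A's
  have hmostB : ((pvGroups s).filter (fun p => p.2 == M)).map Prod.fst
      = DB.filter (fun v => decide (((pl.count v : Int)) = M)) := by
    rw [hDB_def, List.filter_map]
    congr 1
    refine (List.filter_congr ?_).symm
    intro p hp
    simp only [Function.comp_apply, hsnd p hp]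
    rfl
  rw [hmostB]
  set LB := DB.filter (fun v => decide (((pl.count v : Int)) = M)) with hLB_def
  set LA := (PySem.Set.ofList pl).filter (fun v => decide (((pl.count v : Int)) = M)) with hLA_def
  have hLperm : LB.Perm LA := hperm.filter _
  have hLBpw : LB.Pairwise (· < ·) := List.Pairwise.sublist List.filter_sublist hpwB
  have hsortedA : PySem.List.sorted LA (fun x => x) = LB :=
    PySem.List.sorted_eq_of_perm_of_pairwise_lt _ _ (fun x => x) hLperm hLBpw
  have hlen : LA.length = LB.length := hLperm.length_eq.symm
  have hc0 : LA.contains (0 : Int) = LB.contains 0 := (List.Perm.contains_eq hLperm).symm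
  have hc1 : LA.contains (1 : Int) = LB.contains 1 := (List.Perm.contains_eq hLperm).symm
  rw [hlen, hc0, hc1, hsortedA]
  by_cases hone : LB.length = 1
  · rcases List.length_eq_one_iff.mp hone with ⟨b, hb⟩
    have hLAb : LA = [b] := List.perm_singleton.mp (hb ▸ hLperm.symm)
    simp [hLAb, hb]
  · simp [hone]

-- ===== VERDICT (by name: the statement is the Claim_ definition above) =====
theorem get_aggregate_hasSz_spec : Claim_equal_get_aggregate_hasSz := by
  intro pred_list _ hpre
  unfold Spec_get_aggregate_hasSz
  exact pv_main pred_list hpre
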